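-- pv_equiv track=rewrite | github.com/tsouvarev/advent_of_code | 2024/08_resonant_collinearity/part_2.py | get_all_antinodes
-- ===== SOURCE A (Python) =====
-- from collections import defaultdict
-- from collections.abc import Iterable
-- from itertools import combinations, count
-- from typing import NamedTuple
--
-- class Coordinate(NamedTuple):
--     x: int
--     y: int
--
-- def get_all_antinodes(input: list[str]) -> set[Coordinate]:
--     all_coordinates = _convert_input_to_coordinates(input)
--     antinode_generators = []
--
--     for coordinates in all_coordinates.values():
--         for pair in combinations(coordinates, r=2):
--             antinode_generators.extend(_get_antinodes_for_pair(*pair))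
--
--     antinodes = drop_out_of_bound_coordinates(
--         antinode_generators,
--         max_x=len(input),
--         max_y=len(input[0]),
--     )
--
--     return _deduplicate(antinodes)
--
-- def _convert_input_to_coordinates(input: list[str]) -> dict[str, list[Coordinate]]:
--     coordinates = defaultdict(list)
--
--     for i in range(len(input)):
--         for j in range(len(input[i])):
--             char = input[i][j]
--             if char not in ".#":
--                 coordinates[char].append(Coordinate(i, j))
--
--     return coordinates
--
-- def _get_antinodes_for_pair(
--     a: Coordinate,
--     b: Coordinate,
-- ) -> tuple[Iterable[Coordinate]]:
--     diff_x = a.x - b.x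
--     diff_y = a.y - b.y
--
--     return _build_antinodes(a, diff_x, diff_y), _build_antinodes(b, -diff_x, -diff_y)
--
-- def _build_antinodes(p: Coordinate, diff_x: int, diff_y: int) -> Iterable[Coordinate]:
--     yield p
--
--     for k in count(1):
--         yield Coordinate(p.x + k * diff_x, p.y + k * diff_y)
--
-- def drop_out_of_bound_coordinates(
--     antinode_generators: list[Iterable[Coordinate]],
--     max_x: int,
--     max_y: int,
-- ) -> Iterable[Coordinate]:
--     for gen in antinode_generators:
--         for p in gen:
--             if 0 <= p.x < max_x and 0 <= p.y < max_y:
--                 yield p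
--             else:
--                 break
--
-- def _deduplicate(seq) -> list[Coordinate]:
--     return sorted(set(seq))
-- ===== SOURCE B (Python) =====
-- def get_all_antinodes(input: list[str]) -> list:
--     max_x, max_y = len(input), len(input[0])
--     antinodes = set()
--     for ax, row_a in enumerate(input):
--         for ay, ca in enumerate(row_a):
--             if ca in ".#":
--                 continue
--             for bx, row_b in enumerate(input):
--                 for by, cb in enumerate(row_b):
--                     if cb != ca or (ax, ay) == (bx, by):
--                         continue
--                     dx, dy = ax - bx, ay - by
--                     x, y = ax, ay
--                     while 0 <= x < max_x and 0 <= y < max_y: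
--                         antinodes.add((x, y))
--                         x += dx
--                         y += dy
--     return sorted(antinodes)
-- ===== Notes on version B (the rewrite author's own statement) =====
-- stated objective: simpler
-- what changed: Replaces A's defaultdict grouping + itertools.combinations + lazy infinite generators filtered by a separate break-on-out-of-bounds pass with a single function that scans ordered pairs of same-character grid cells and eagerly walks each in-bounds ray into one set, returning sorted(set).
import Mathlib
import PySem

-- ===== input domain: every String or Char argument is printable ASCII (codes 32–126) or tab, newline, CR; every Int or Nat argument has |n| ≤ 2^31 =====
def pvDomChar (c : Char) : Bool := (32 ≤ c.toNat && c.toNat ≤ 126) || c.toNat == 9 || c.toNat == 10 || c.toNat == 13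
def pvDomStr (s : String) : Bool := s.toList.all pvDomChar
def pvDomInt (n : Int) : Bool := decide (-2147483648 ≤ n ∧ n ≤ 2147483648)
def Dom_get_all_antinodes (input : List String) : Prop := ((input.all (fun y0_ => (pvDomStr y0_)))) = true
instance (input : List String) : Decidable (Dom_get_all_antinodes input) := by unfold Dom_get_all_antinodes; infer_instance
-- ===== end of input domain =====

-- B replaces A's dict-grouping + itertools.combinations + lazy generator/filter pipeline by a direct
-- scan over ordered pairs of same-character grid cells with an eager in-bounds walk into one set
-- (objective: simpler — no faster; returns the same sorted list).

-- ===== PORT A =====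
-- A's infinite generator `_build_antinodes` consumed by `drop_out_of_bound_coordinates`'s
-- per-generator `break` IS the in-bounds prefix of the arithmetic ray: pvWalkA yields points
-- while in bounds and stops at the first out-of-bounds one, exactly the fused pipeline.
-- fuel = maxX+maxY+1 bounds the prefix length (one coordinate moves by a nonzero step).
def pvWalkA (maxX maxY dx dy : Int) : Nat → (Int × Int) → List (Int × Int)
  | 0, _ => []
  | fuel+1, p =>
    if 0 ≤ p.1 ∧ p.1 < maxX ∧ 0 ≤ p.2 ∧ p.2 < maxY then
      p :: pvWalkA maxX maxY dx dy fuel (p.1 + dx, p.2 + dy)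
    else []

-- _convert_input_to_coordinates: defaultdict(list) grouping, `for i in range(len(input)): for j in range(len(input[i]))`
def pvConvertA (input : List String) : PySem.Dict Char (List (Int × Int)) :=
  (PySem.List.pyRange 0 (PySem.List.len input) 1).foldl (fun d i =>
    let row := (PySem.List.pyGetD input i "").toList
    (PySem.List.pyRange 0 (PySem.List.len row) 1).foldl (fun d' j =>
      let ch := PySem.List.pyGetD row j ' '
      if ch = '.' ∨ ch = '#' then d' else d'.modify ch [] (· ++ [(i, j)])) d) PySem.Dict.empty

-- the `antinode_generators` list: each generator is its start point and step (p, (dx, dy))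
def pvGensA (input : List String) : List ((Int × Int) × Int × Int) :=
  (pvConvertA input).values.foldl (fun acc coords =>
    (PySem.List.combinations coords 2).foldl (fun acc2 pr =>
      match pr with
      | [a, b] => acc2 ++ [(a, (a.1 - b.1, a.2 - b.2)), (b, (b.1 - a.1, b.2 - a.2))]
      | _ => acc2) acc) []

-- drop_out_of_bound_coordinates over all generators
def pvAntsA (input : List String) : List (Int × Int) :=
  (pvGensA input).foldl (fun acc g =>
    acc ++ pvWalkA (PySem.List.len input) (PySem.Str.len (input.getD 0 ""))
      g.2.1 g.2.2 ((PySem.List.len input + PySem.Str.len (input.getD 0 "")).toNat + 1) g.1) []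

def get_all_antinodes (input : List String) : List (Int × Int) :=
  PySem.List.sorted2 (PySem.Set.ofList (pvAntsA input)) Prod.fst Prod.snd

-- ===== PORT B =====
-- Source B's `while 0 <= x < max_x and 0 <= y < max_y: antinodes.add((x, y)); x += dx; y += dy`
def pvWalkB (maxX maxY dx dy : Int) : Nat → (Int × Int) → PySem.Set (Int × Int) → PySem.Set (Int × Int)
  | 0, _, s => s
  | fuel+1, p, s =>
    if 0 ≤ p.1 ∧ p.1 < maxX ∧ 0 ≤ p.2 ∧ p.2 < maxY then
      pvWalkB maxX maxY dx dy fuel (p.1 + dx, p.2 + dy) (PySem.Set.add s p)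
    else s

def get_all_antinodes_alt (input : List String) : List (Int × Int) :=
  let maxX := PySem.List.len input
  let maxY := PySem.Str.len (input.getD 0 "")
  let fuel := (maxX + maxY).toNat + 1
  let s := (PySem.List.enumerate input 0).foldl (fun s ir =>
    (PySem.List.enumerate ir.2.toList 0).foldl (fun s jc =>
      if jc.2 = '.' ∨ jc.2 = '#' then s else
        (PySem.List.enumerate input 0).foldl (fun s kr =>
          (PySem.List.enumerate kr.2.toList 0).foldl (fun s lc =>
            if lc.2 = jc.2 ∧ (ir.1, jc.1) ≠ (kr.1, lc.1) then
              pvWalkB maxX maxY (ir.1 - kr.1) (jc.1 - lc.1) fuel (ir.1, jc.1) s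
            else s) s) s) s) PySem.Set.empty
  PySem.List.sorted2 s Prod.fst Prod.snd

-- ===== PRECONDITION & SPEC =====
-- Pre_ excludes only the empty list, on which Python A raises IndexError at len(input[0]) (B raises there too).
def Pre_get_all_antinodes (input : List String) : Prop := input ≠ []
instance (input : List String) : Decidable (Pre_get_all_antinodes input) := by unfold Pre_get_all_antinodes; infer_instance

def pvWitness_get_all_antinodes : List String := ["a.a"]

def Spec_get_all_antinodes (input : List String) (out : List (Int × Int)) : Prop := out = get_all_antinodes_alt input
instance (input : List String) (out : List (Int × Int)) : Decidable (Spec_get_all_antinodes input out) := by unfold Spec_get_all_antinodes; infer_instance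

-- ===== CLAIM (what is proved, stated in full; the proofs are below) =====
def Claim_equal_get_all_antinodes : Prop := ∀ (input : List String), Dom_get_all_antinodes input → Pre_get_all_antinodes input → Spec_get_all_antinodes input (get_all_antinodes input)

-- ===== LEMMAS AND PROOFS =====

-- the flattened list of antenna cells (char, (row, col)) in scan order, for the proofs
def pvRowCells (i : Int) (row : List Char) : List (Char × (Int × Int)) :=
  ((PySem.List.enumerate row 0).filter (fun jc => !(jc.2 == '.' || jc.2 == '#'))).map
    (fun jc => (jc.2, (i, jc.1)))

def pvCells (input : List String) : List (Char × (Int × Int)) :=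
  (PySem.List.enumerate input 0).flatMap (fun ir => pvRowCells ir.1 ir.2.toList)

def pvCellStep (d : PySem.Dict Char (List (Int × Int))) (p : Char × (Int × Int)) :
    PySem.Dict Char (List (Int × Int)) := d.modify p.1 [] (· ++ [p.2])

-- "x is an antinode": some ordered pair of distinct same-character cells reaches x on its in-bounds ray
def pvHit (input : List String) (x : Int × Int) : Prop :=
  ∃ c a b, (c, a) ∈ pvCells input ∧ (c, b) ∈ pvCells input ∧ a ≠ b ∧
    x ∈ pvWalkA (PySem.List.len input) (PySem.Str.len (input.getD 0 ""))
        (a.1 - b.1) (a.2 - b.2)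
        ((PySem.List.len input + PySem.Str.len (input.getD 0 "")).toNat + 1) a

lemma pvRow_foldl (i : Int) (row : List Char) (d : PySem.Dict Char (List (Int × Int))) :
    (PySem.List.pyRange 0 (PySem.List.len row) 1).foldl (fun d' j =>
      let ch := PySem.List.pyGetD row j ' '
      if ch = '.' ∨ ch = '#' then d' else d'.modify ch [] (· ++ [(i, j)])) d
    = (pvRowCells i row).foldl pvCellStep d := by
  unfold pvRowCells
  rw [List.foldl_map, List.foldl_filter, PySem.List.enumerate_eq_map_pyRange row ' ', List.foldl_map]
  congr 1
  funext d' j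
  simp only [pvCellStep]
  by_cases h : PySem.List.pyGetD row j ' ' = '.' ∨ PySem.List.pyGetD row j ' ' = '#'
  · rcases h with h | h <;> simp [h]
  · push_neg at h
    simp [h.1, h.2]

lemma pvConvertA_eq_foldl (input : List String) :
    pvConvertA input = (pvCells input).foldl pvCellStep PySem.Dict.empty := by
  unfold pvConvertA pvCells
  rw [List.foldl_flatMap, PySem.List.enumerate_eq_map_pyRange input "", List.foldl_map]
  congr 1
  funext d i
  exact pvRow_foldl i ((PySem.List.pyGetD input i "").toList) d

lemma pvGroup (input : List String) (c : Char) :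
    (pvConvertA input).getD c [] = ((pvCells input).filter (fun p => p.1 == c)).map (·.2) := by
  rw [pvConvertA_eq_foldl]
  have h := PySem.Dict.getD_foldl_modify_append (pvCells input) PySem.Dict.empty c
  simpa [pvCellStep, PySem.Dict.getD_empty] using h

lemma pvKeys_foldl (l : List (Char × (Int × Int))) (d : PySem.Dict Char (List (Int × Int))) :
    (l.foldl pvCellStep d).keys = PySem.Set.update d.keys (l.map (·.1)) := by
  induction l generalizing d with
  | nil => simp [PySem.Set.update_nil]
  | cons x t ih =>
    simp only [List.foldl_cons, List.map_cons, PySem.Set.update_cons, ih]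
    congr 1
    rw [pvCellStep, PySem.Dict.keys_modify]
    by_cases h : d.contains x.1 = true
    · rw [PySem.Dict.keys_insert_of_contains _ _ h,
        PySem.Set.add_of_mem ((PySem.Dict.contains_iff_mem_keys d x.1).1 h)]
    · have h' : d.contains x.1 = false := by simpa using h
      rw [PySem.Dict.keys_insert_of_not_contains _ _ h',
        PySem.Set.add_of_not_mem (fun hm => by
          rw [(PySem.Dict.contains_iff_mem_keys d x.1).2 hm] at h'; cases h')]

lemma pvCells_snd_nodup (input : List String) : ((pvCells input).map (·.2)).Nodup := by
  unfold pvCells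
  rw [List.map_flatMap, List.nodup_flatMap]
  constructor
  · intro ir _
    unfold pvRowCells
    rw [List.map_map]
    refine List.Pairwise.map _ ?_
      (List.Pairwise.sublist List.filter_sublist (PySem.List.pairwise_lt_enumerate ir.2.toList 0))
    intro a b h heq
    simp [Function.comp] at heq
    omega
  · refine (PySem.List.pairwise_lt_enumerate input 0).imp ?_
    intro p q hlt a ha hb
    simp only [pvRowCells, List.map_map, List.mem_map, Function.comp] at ha hb
    obtain ⟨u, hu, hua⟩ := ha
    obtain ⟨v, hv, hva⟩ := hb
    rw [← hua] at hva
    simp [Prod.ext_iff] at hva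
    omega

lemma pvMem_cells (input : List String) (c : Char) (a : Int × Int) :
    (c, a) ∈ pvCells input ↔ a ∈ ((pvCells input).filter (fun p => p.1 == c)).map (·.2) := by
  constructor
  · intro h
    exact List.mem_map.2 ⟨(c, a), List.mem_filter.2 ⟨h, by simp⟩, rfl⟩
  · intro h
    obtain ⟨p, hp, hpa⟩ := List.mem_map.1 h
    obtain ⟨hmem, hfst⟩ := List.mem_filter.1 hp
    obtain ⟨p1, p2⟩ := p
    simp at hfst hpa
    rw [hfst, hpa] at hmem
    exact hmem

lemma pvMem_values (input : List String) (coords : List (Int × Int)) :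
    coords ∈ (pvConvertA input).values ↔
      ∃ c, c ∈ (pvCells input).map (·.1) ∧ coords = (pvConvertA input).getD c [] := by
  have hkeys : (pvConvertA input).keys
      = PySem.Set.update (PySem.Dict.empty : PySem.Dict Char (List (Int × Int))).keys
          ((pvCells input).map (·.1)) := by
    rw [pvConvertA_eq_foldl, pvKeys_foldl]
  have hnodup : (pvConvertA input).keys.Nodup := by
    rw [hkeys]; exact PySem.Set.nodup_update _ _ PySem.Dict.nodup_keys_empty
  have hmemk : ∀ c : Char, c ∈ (pvConvertA input).keys ↔ c ∈ (pvCells input).map (·.1) := by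
    intro c
    rw [hkeys, PySem.Set.mem_update]
    simp [PySem.Dict.empty, PySem.Dict.keys]
  constructor
  · intro h
    obtain ⟨p, hp, hpc⟩ := List.mem_map.1 h
    obtain ⟨p1, p2⟩ := p
    have hget := PySem.Dict.get?_of_mem_items (pvConvertA input) hp hnodup
    refine ⟨p1, ?_, ?_⟩
    · exact (hmemk p1).1 (PySem.Dict.mem_keys_of_mem_items _ hp)
    · rw [← hpc]
      exact (PySem.Dict.getD_of_get?_eq_some _ _ hget).symm
  · rintro ⟨c, hc, rfl⟩
    have hcont : (pvConvertA input).contains c = true :=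
      (PySem.Dict.contains_iff_mem_keys _ _).2 ((hmemk c).2 hc)
    rw [PySem.Dict.contains_eq_isSome_get?] at hcont
    obtain ⟨v, hv⟩ := Option.isSome_iff_exists.1 hcont
    rw [PySem.Dict.getD_of_get?_eq_some _ _ hv]
    exact List.mem_map.2 ⟨(c, v), PySem.Dict.mem_items_of_get?_eq_some _ hv, rfl⟩

lemma pvSublist_pair {α : Type} {a b : α} {l : List α} (ha : a ∈ l) (hb : b ∈ l) (hne : a ≠ b) :
    [a, b].Sublist l ∨ [b, a].Sublist l := by
  induction l with
  | nil => cases ha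
  | cons x t ih =>
    rcases List.mem_cons.1 ha with rfl | ha'
    · have hb' : b ∈ t := by
        rcases List.mem_cons.1 hb with rfl | h
        · exact absurd rfl hne
        · exact h
      exact Or.inl ((List.singleton_sublist.2 hb').cons₂ a)
    · rcases List.mem_cons.1 hb with rfl | hb'
      · exact Or.inr ((List.singleton_sublist.2 ha').cons₂ b)
      · rcases ih ha' hb' with h | h
        · exact Or.inl (h.cons x)
        · exact Or.inr (h.cons x)

def pvPairGens (pr : List (Int × Int)) : List ((Int × Int) × Int × Int) :=
  match pr with
  | [a, b] => [(a, (a.1 - b.1, a.2 - b.2)), (b, (b.1 - a.1, b.2 - a.2))]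
  | _ => []

lemma pvGensA_eq (input : List String) :
    pvGensA input = (pvConvertA input).values.flatMap
      (fun coords => (PySem.List.combinations coords 2).flatMap pvPairGens) := by
  unfold pvGensA
  have hfun : (fun (acc : List ((Int × Int) × Int × Int)) (coords : List (Int × Int)) =>
      (PySem.List.combinations coords 2).foldl (fun acc2 pr =>
        match pr with
        | [a, b] => acc2 ++ [(a, (a.1 - b.1, a.2 - b.2)), (b, (b.1 - a.1, b.2 - a.2))]
        | _ => acc2) acc)
      = fun acc coords => acc ++ (PySem.List.combinations coords 2).flatMap pvPairGens := by
    funext acc coords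
    rw [← PySem.List.foldl_append_eq_flatMap]
    congr 1
    funext acc2 pr
    cases pr with
    | nil => simp [pvPairGens]
    | cons a t => cases t with
      | nil => simp [pvPairGens]
      | cons b t2 => cases t2 with
        | nil => simp [pvPairGens]
        | cons c t3 => simp [pvPairGens]
  rw [hfun, PySem.List.foldl_append_eq_flatMap, List.nil_append]

lemma pvMem_antsA (input : List String) (x : Int × Int) :
    x ∈ pvAntsA input ↔ pvHit input x := by
  unfold pvAntsA
  rw [PySem.List.foldl_append_eq_flatMap, pvGensA_eq, List.nil_append]
  simp only [List.mem_flatMap]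
  constructor
  · rintro ⟨g, ⟨coords, hcoords, hg⟩, hx⟩
    obtain ⟨c, hc, rfl⟩ := (pvMem_values input coords).1 hcoords
    obtain ⟨pr, hpr, hgpr⟩ := hg
    obtain ⟨hsub, hlen⟩ := (PySem.List.mem_combinations_iff _ _ _).1 hpr
    have hgroupnodup : ((pvConvertA input).getD c []).Nodup := by
      rw [pvGroup]
      exact List.Nodup.sublist (List.Sublist.map _ List.filter_sublist) (pvCells_snd_nodup input)
    match pr, hlen, hsub, hgpr with
    | [a, b], _, hsub, hgpr =>
      have hab : a ≠ b := by
        have hnd : ([a, b] : List (Int × Int)).Nodup := List.Nodup.sublist hsub hgroupnodup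
        simpa using hnd
      have ha : a ∈ (pvConvertA input).getD c [] := hsub.subset (by simp)
      have hb : b ∈ (pvConvertA input).getD c [] := hsub.subset (by simp)
      rw [pvGroup] at ha hb
      have hca : (c, a) ∈ pvCells input := (pvMem_cells input c a).2 ha
      have hcb : (c, b) ∈ pvCells input := (pvMem_cells input c b).2 hb
      have hgpr' : g = (a, (a.1 - b.1, a.2 - b.2)) ∨ g = (b, (b.1 - a.1, b.2 - a.2)) := by
        have h2 : g ∈ [(a, (a.1 - b.1, a.2 - b.2)), (b, (b.1 - a.1, b.2 - a.2))] := hgpr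
        simpa using h2
      rcases hgpr' with rfl | rfl
      · exact ⟨c, a, b, hca, hcb, hab, hx⟩
      · exact ⟨c, b, a, hcb, hca, Ne.symm hab, hx⟩
  · rintro ⟨c, a, b, hca, hcb, hab, hx⟩
    have ha : a ∈ (pvConvertA input).getD c [] := by
      rw [pvGroup]; exact (pvMem_cells input c a).1 hca
    have hb : b ∈ (pvConvertA input).getD c [] := by
      rw [pvGroup]; exact (pvMem_cells input c b).1 hcb
    have hcmem : (pvConvertA input).getD c [] ∈ (pvConvertA input).values :=
      (pvMem_values input _).2 ⟨c, List.mem_map.2 ⟨(c, a), hca, rfl⟩, rfl⟩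
    rcases pvSublist_pair ha hb hab with hs | hs
    · refine ⟨(a, (a.1 - b.1, a.2 - b.2)), ⟨_, hcmem, ?_⟩, hx⟩
      have hcomb : [a, b] ∈ PySem.List.combinations ((pvConvertA input).getD c []) 2 :=
        (PySem.List.mem_combinations_iff _ 2 [a, b]).2 ⟨hs, rfl⟩
      have hmem : (a, (a.1 - b.1, a.2 - b.2)) ∈ pvPairGens [a, b] := List.Mem.head _
      exact ⟨[a, b], hcomb, hmem⟩
    · refine ⟨(a, (a.1 - b.1, a.2 - b.2)), ⟨_, hcmem, ?_⟩, hx⟩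
      have hcomb : [b, a] ∈ PySem.List.combinations ((pvConvertA input).getD c []) 2 :=
        (PySem.List.mem_combinations_iff _ 2 [b, a]).2 ⟨hs, rfl⟩
      have hmem : (a, (a.1 - b.1, a.2 - b.2)) ∈ pvPairGens [b, a] :=
        List.Mem.tail _ (List.Mem.head _)
      exact ⟨[b, a], hcomb, hmem⟩

lemma pvWalkB_eq_update (maxX maxY dx dy : Int) (fuel : Nat) (p : Int × Int)
    (s : PySem.Set (Int × Int)) :
    pvWalkB maxX maxY dx dy fuel p s = PySem.Set.update s (pvWalkA maxX maxY dx dy fuel p) := by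
  induction fuel generalizing p s with
  | zero => simp [pvWalkA, pvWalkB, PySem.Set.update_nil]
  | succ n ih =>
    by_cases h : 0 ≤ p.1 ∧ p.1 < maxX ∧ 0 ≤ p.2 ∧ p.2 < maxY
    · simp only [pvWalkA, pvWalkB, if_pos h, ih, PySem.Set.update_cons]
    · simp [pvWalkA, pvWalkB, if_neg h, PySem.Set.update_nil]

lemma pvFoldl_update {α β : Type} [BEq α] (l : List β) (g : β → List α) (s : PySem.Set α) :
    l.foldl (fun s e => PySem.Set.update s (g e)) s = PySem.Set.update s (l.flatMap g) := by
  induction l generalizing s with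
  | nil => simp [PySem.Set.update_nil]
  | cons x t ih => simp only [List.foldl_cons, List.flatMap_cons, ih, PySem.Set.update_append]

lemma pvFoldl_update_if {α β : Type} [BEq α] (l : List β) (p : β → Prop) [DecidablePred p]
    (g : β → List α) (s : PySem.Set α) :
    l.foldl (fun s e => if p e then PySem.Set.update s (g e) else s) s
      = PySem.Set.update s (l.flatMap (fun e => if p e then g e else [])) := by
  induction l generalizing s with
  | nil => simp [PySem.Set.update_nil]
  | cons x t ih =>
    simp only [List.foldl_cons, List.flatMap_cons, ih, PySem.Set.update_append]
    by_cases h : p x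
    · simp [h]
    · simp [h, PySem.Set.update_nil]

lemma pvFoldl_skip_if {α β : Type} [BEq α] (l : List β) (p : β → Prop) [DecidablePred p]
    (g : β → List α) (s : PySem.Set α) :
    l.foldl (fun s e => if p e then s else PySem.Set.update s (g e)) s
      = PySem.Set.update s (l.flatMap (fun e => if p e then [] else g e)) := by
  induction l generalizing s with
  | nil => simp [PySem.Set.update_nil]
  | cons x t ih =>
    simp only [List.foldl_cons, List.flatMap_cons, ih, PySem.Set.update_append]
    by_cases h : p x
    · simp [h, PySem.Set.update_nil]
    · simp [h]

lemma pvMem_ite_nil {α : Type} (c : Prop) [Decidable c] (l : List α) (x : α) :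
    x ∈ (if c then l else []) ↔ c ∧ x ∈ l := by
  split_ifs with h <;> simp [h]

lemma pvMem_nil_ite {α : Type} (c : Prop) [Decidable c] (l : List α) (x : α) :
    x ∈ (if c then [] else l) ↔ ¬c ∧ x ∈ l := by
  split_ifs with h <;> simp [h]

lemma pvMem_cells_iff (input : List String) (q : Char × (Int × Int)) :
    q ∈ pvCells input ↔ ∃ ir ∈ PySem.List.enumerate input 0,
      ∃ jc ∈ PySem.List.enumerate ir.2.toList 0,
        ¬(jc.2 = '.' ∨ jc.2 = '#') ∧ q = (jc.2, (ir.1, jc.1)) := by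
  unfold pvCells pvRowCells
  simp only [List.mem_flatMap, List.mem_map, List.mem_filter]
  constructor
  · rintro ⟨ir, hir, jc, ⟨hjc, hkeep⟩, rfl⟩
    refine ⟨ir, hir, jc, hjc, ?_, rfl⟩
    simpa using hkeep
  · rintro ⟨ir, hir, jc, hjc, hk, rfl⟩
    exact ⟨ir, hir, jc, ⟨hjc, by simpa using hk⟩, rfl⟩

def pvBigB (input : List String) : List (Int × Int) :=
  (PySem.List.enumerate input 0).flatMap (fun ir =>
    (PySem.List.enumerate ir.2.toList 0).flatMap (fun jc =>
      if jc.2 = '.' ∨ jc.2 = '#' then [] else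
        (PySem.List.enumerate input 0).flatMap (fun kr =>
          (PySem.List.enumerate kr.2.toList 0).flatMap (fun lc =>
            if lc.2 = jc.2 ∧ (ir.1, jc.1) ≠ (kr.1, lc.1) then
              pvWalkA (PySem.List.len input) (PySem.Str.len (input.getD 0 ""))
                (ir.1 - kr.1) (jc.1 - lc.1)
                ((PySem.List.len input + PySem.Str.len (input.getD 0 "")).toNat + 1)
                (ir.1, jc.1)
            else []))))

-- the set built by B's four nested loops, as set(big list)
lemma pvBSet_eq (input : List String) :
    ((PySem.List.enumerate input 0).foldl (fun s ir =>
      (PySem.List.enumerate ir.2.toList 0).foldl (fun s jc =>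
        if jc.2 = '.' ∨ jc.2 = '#' then s else
          (PySem.List.enumerate input 0).foldl (fun s kr =>
            (PySem.List.enumerate kr.2.toList 0).foldl (fun s lc =>
              if lc.2 = jc.2 ∧ (ir.1, jc.1) ≠ (kr.1, lc.1) then
                pvWalkB (PySem.List.len input) (PySem.Str.len (input.getD 0 ""))
                  (ir.1 - kr.1) (jc.1 - lc.1)
                  ((PySem.List.len input + PySem.Str.len (input.getD 0 "")).toNat + 1)
                  (ir.1, jc.1) s
              else s) s) s) s) (PySem.Set.empty : PySem.Set (Int × Int)))
    = PySem.Set.ofList (pvBigB input) := by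
  unfold pvBigB
  simp only [pvWalkB_eq_update, pvFoldl_update_if, pvFoldl_update, pvFoldl_skip_if,
    PySem.Set.update_empty]

lemma pvMem_big (input : List String) (x : Int × Int) :
    x ∈ pvBigB input ↔ pvHit input x := by
  unfold pvBigB pvHit
  simp only [List.mem_flatMap, pvMem_ite_nil, pvMem_nil_ite]
  constructor
  · rintro ⟨ir, hir, jc, hjc, hkeep, kr, hkr, lc, hlc, ⟨hcc, hne⟩, hx⟩
    refine ⟨jc.2, (ir.1, jc.1), (kr.1, lc.1), ?_, ?_, hne, hx⟩
    · exact (pvMem_cells_iff input _).2 ⟨ir, hir, jc, hjc, hkeep, rfl⟩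
    · refine (pvMem_cells_iff input _).2 ⟨kr, hkr, lc, hlc, ?_, ?_⟩
      · rw [hcc]; exact hkeep
      · rw [hcc]
  · rintro ⟨c, a, b, hca, hcb, hab, hx⟩
    obtain ⟨ir, hir, jc, hjc, hkeep, heq1⟩ := (pvMem_cells_iff input _).1 hca
    obtain ⟨kr, hkr, lc, hlc, _, heq2⟩ := (pvMem_cells_iff input _).1 hcb
    have hc1 : c = jc.2 := congrArg Prod.fst heq1
    have ha1 : a = (ir.1, jc.1) := congrArg Prod.snd heq1
    have hc2 : c = lc.2 := congrArg Prod.fst heq2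
    have hb1 : b = (kr.1, lc.1) := congrArg Prod.snd heq2
    subst ha1; subst hb1; subst hc1
    exact ⟨ir, hir, jc, hjc, hkeep, kr, hkr, lc, hlc, ⟨hc2.symm, hab⟩, hx⟩

lemma pvSorted2_eq_of_perm (xs ys : List (Int × Int)) (h : xs.Perm ys) :
    PySem.List.sorted2 xs Prod.fst Prod.snd = PySem.List.sorted2 ys Prod.fst Prod.snd := by
  have key : ∀ zs : List (Int × Int),
      PySem.List.sorted2 zs Prod.fst Prod.snd
        = PySem.List.sorted zs (fun p => (toLex p : Lex (Int × Int))) := by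
    intro zs
    rw [PySem.List.sorted_eq_foldl_insertBy]
    simp only [PySem.List.sorted2]
    norm_num
    congr 1
    funext acc x
    congr 1
    funext a b
    have : (toLex a < toLex b) ↔ (a.1 < b.1 ∨ a.1 = b.1 ∧ a.2 < b.2) := by
      simpa using (Prod.Lex.lt_iff (x := toLex a) (y := toLex b))
    by_cases h1 : a.1 < b.1 <;> by_cases h2 : b.1 < a.1 <;> by_cases h3 : a.2 < b.2 <;>
      simp [this, h1, h2, h3] <;> omega
  rw [key, key]
  exact PySem.List.sorted_eq_sorted_of_perm xs ys _ (fun u v huv => toLex.injective huv) h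

-- ===== VERDICT (by name: the statement is the Claim_ definition above) =====
theorem get_all_antinodes_spec : Claim_equal_get_all_antinodes := by
  intro input hdom hpre
  unfold Spec_get_all_antinodes
  simp only [get_all_antinodes, get_all_antinodes_alt]
  rw [pvBSet_eq]
  refine pvSorted2_eq_of_perm _ _ ?_
  rw [List.perm_ext_iff_of_nodup (PySem.Set.nodup_ofList _) (PySem.Set.nodup_ofList _)]
  intro y
  rw [PySem.Set.mem_ofList, PySem.Set.mem_ofList, pvMem_antsA]
  exact (pvMem_big input y).symm
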